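-- pv_equiv track=rewrite | github.com/Ssunbell/Algorithm_Study | 25주차/PRO_파괴되지않는건물/PRO_파괴되지않는건물_이승환.py | solution
-- ===== SOURCE A (Python) =====
-- def solution(board, skill):
--     answer = 0
--     i_idx = len(board)
--     j_idx = len(board[0])
--     new_board = [[0]*(j_idx+1) for _ in range(i_idx+1)]
--     for stats in skill:
--         tp,i_start,j_start,i_finish,j_finish,degree = stats
--         if tp == 1:
--             degree = -degree
--         new_board[i_start][j_start] += degree
--         new_board[i_start][j_finish+1] -= degree
--         new_board[i_finish+1][j_start] -= degree
--         new_board[i_finish+1][j_finish+1] += degree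
--
--     for i in range(i_idx+1):
--         for j in range(1,j_idx+1):
--             new_board[i][j] += new_board[i][j-1]
--
--     for j in range(j_idx+1):
--         for i in range(1,i_idx+1):
--             new_board[i][j] += new_board[i-1][j]
--
--     for i in range(i_idx):
--         for j in range(j_idx):
--             board[i][j] += new_board[i][j]
--             if board[i][j] > 0:
--                 answer += 1
--
--     return answer
-- ===== SOURCE B (Python) =====
-- # B: applies each skill's damage directly to the affected rectangle of board
-- # (same in-place mutation of board as A inside the stated precondition), then
-- # counts the positive cells of the n x m grid (m = len(board[0])).  Simpler: no
-- # (n+1)x(m+1) difference array, no prefix-sum passes.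
-- def solution(board, skill):
--     m = len(board[0])
--     for tp, r1, c1, r2, c2, degree in skill:
--         if tp == 1:
--             degree = -degree
--         for i in range(r1, r2 + 1):
--             for j in range(c1, c2 + 1):
--                 board[i][j] += degree
--     answer = 0
--     for row in board:
--         for v in row[:m]:
--             if v > 0:
--                 answer += 1
--     return answer
-- ===== Notes on version B (the rewrite author's own statement) =====
-- stated objective: simpler
-- what changed: Replaces A's (n+1)x(m+1) 2D difference array and its two prefix-sum passes by directly adding each skill's signed degree to every cell of its rectangle in board, then counting positive cells of the n x m grid; Pre_ restricts to the problem's natural domain (nonempty board, rows >= len(board[0]), skills 0 <= r1 <= r2 < n, 0 <= c1 <= c2 < m).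
-- outside the precondition, e.g. on solution([[1], [1], [1]], [[2, 2, 0, 0, 0, 5]]): A returns 2, B returns 3; on solution([[1, 1], [1, 1]], [[2, -1, 0, -1, 0, 5]]): A returns 2, B returns 4
import Mathlib
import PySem

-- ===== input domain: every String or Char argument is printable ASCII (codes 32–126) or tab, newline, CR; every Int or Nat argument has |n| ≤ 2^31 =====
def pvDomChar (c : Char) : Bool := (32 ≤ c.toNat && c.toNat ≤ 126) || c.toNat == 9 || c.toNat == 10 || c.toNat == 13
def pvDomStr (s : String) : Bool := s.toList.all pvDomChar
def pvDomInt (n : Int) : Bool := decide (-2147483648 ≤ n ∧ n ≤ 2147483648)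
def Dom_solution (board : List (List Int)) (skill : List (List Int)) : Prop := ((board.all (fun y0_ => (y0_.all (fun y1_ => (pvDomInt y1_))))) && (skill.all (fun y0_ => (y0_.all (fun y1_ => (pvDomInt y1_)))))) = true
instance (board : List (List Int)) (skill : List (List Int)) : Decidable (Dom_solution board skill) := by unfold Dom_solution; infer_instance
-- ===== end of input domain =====

-- B replaces A's 2D difference array + two prefix-sum passes by direct per-rectangle
-- addition, then counts positive cells (simpler).  Both Pythons mutate `board` in place
-- to the same final state on Pre_; the theorems here are about the RETURN value only.

-- ===== PORT A =====
-- shared low-level cell access: g[i][j] and g[i][j] += d, Python index semantics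
-- (exact for in-range and negative-wrap indices; Python raises IndexError out of
-- range, which Pre_solution excludes)
def pvGetCell (g : List (List Int)) (i j : Int) : Int :=
  PySem.List.pyGetD (PySem.List.pyGetD g i []) j 0

def pvAddCell (g : List (List Int)) (i j d : Int) : List (List Int) :=
  PySem.List.pySetD g i
    (PySem.List.pySetD (PySem.List.pyGetD g i []) j (pvGetCell g i j + d))

-- one iteration of A's skill loop (a stats row that is not a 6-list raises
-- ValueError on unpacking in Python; Pre_solution excludes it)
def pvSkillStep (nb : List (List Int)) (stats : List Int) : List (List Int) :=
  match stats with
  | [tp, i_start, j_start, i_finish, j_finish, deg] =>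
    let degree := if tp = 1 then -deg else deg
    let nb1 := pvAddCell nb i_start j_start degree
    let nb2 := pvAddCell nb1 i_start (j_finish + 1) (-degree)
    let nb3 := pvAddCell nb2 (i_finish + 1) j_start (-degree)
    pvAddCell nb3 (i_finish + 1) (j_finish + 1) degree
  | _ => nb

def solution (board : List (List Int)) (skill : List (List Int)) : Int :=
  let i_idx : Nat := board.length
  let j_idx : Nat := (PySem.List.pyGetD board 0 []).length
  let nb0 := List.replicate (i_idx + 1) (List.replicate (j_idx + 1) (0 : Int))
  let nb1 := skill.foldl pvSkillStep nb0
  let nb2 := (PySem.List.pyRange 0 ((i_idx : Int) + 1) 1).foldl (fun nb i =>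
      (PySem.List.pyRange 1 ((j_idx : Int) + 1) 1).foldl
        (fun nb j => pvAddCell nb i j (pvGetCell nb i (j - 1))) nb) nb1
  let nb3 := (PySem.List.pyRange 0 ((j_idx : Int) + 1) 1).foldl (fun nb j =>
      (PySem.List.pyRange 1 ((i_idx : Int) + 1) 1).foldl
        (fun nb i => pvAddCell nb i j (pvGetCell nb (i - 1) j)) nb) nb2
  (PySem.List.pyRange 0 (i_idx : Int) 1).foldl (fun ans i =>
    (PySem.List.pyRange 0 (j_idx : Int) 1).foldl (fun ans j =>
      if pvGetCell board i j + pvGetCell nb3 i j > 0 then ans + 1 else ans) ans) 0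

-- ===== PORT B =====
-- one iteration of B's skill loop: add the signed degree to every cell of the rectangle
def pvBSkillStep (b : List (List Int)) (stats : List Int) : List (List Int) :=
  match stats with
  | [tp, r1, c1, r2, c2, deg] =>
    let degree := if tp = 1 then -deg else deg
    (PySem.List.pyRange r1 (r2 + 1) 1).foldl (fun b i =>
      (PySem.List.pyRange c1 (c2 + 1) 1).foldl
        (fun b j => pvAddCell b i j degree) b) b
  | _ => b

def solution_alt (board : List (List Int)) (skill : List (List Int)) : Int :=
  let m : Nat := (PySem.List.pyGetD board 0 []).length
  let board' := skill.foldl pvBSkillStep board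
  board'.foldl (fun ans row =>
    (PySem.List.slice row none (some (m:Int))).foldl
      (fun ans v => if v > 0 then ans + 1 else ans) ans) 0

-- ===== PRECONDITION & SPEC =====
-- Pre_solution restricts to the problem's natural domain: a nonempty board whose rows
-- all have at least m = len(board[0]) cells, and skills that are 6-lists
-- [type, r1, c1, r2, c2, degree] with 0 ≤ r1 ≤ r2 < n and 0 ≤ c1 ≤ c2 < m.  Outside it
-- A raises (empty board, rows shorter than row 0, non-6 skill rows, out-of-range
-- rectangle corners), or the skill is a malformed rectangle (negative or inverted
-- bounds) that A and B read through different conventions — Python's negative-index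
-- wraparound lands on different rows of A's (n+1)x(m+1) array than of the n x m board,
-- and an inverted range is empty for B while A's difference array spans the swapped
-- bounds — so neither value is specified.
def Pre_solution (board : List (List Int)) (skill : List (List Int)) : Prop :=
  board ≠ [] ∧
  (∀ row ∈ board, (board.headD []).length ≤ row.length) ∧
  (∀ s ∈ skill, s.length = 6 ∧
    0 ≤ s.getD 1 0 ∧ s.getD 1 0 ≤ s.getD 3 0 ∧ s.getD 3 0 < (board.length : Int) ∧
    0 ≤ s.getD 2 0 ∧ s.getD 2 0 ≤ s.getD 4 0 ∧
    s.getD 4 0 < ((board.headD []).length : Int))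

instance (board : List (List Int)) (skill : List (List Int)) :
    Decidable (Pre_solution board skill) := by unfold Pre_solution; infer_instance

def pvWitness_solution : List (List Int) × List (List Int) :=
  ([[1, -2], [0, 3]], [[1, 0, 0, 1, 1, 1], [2, 0, 1, 1, 1, 4]])

def Spec_solution (board : List (List Int)) (skill : List (List Int)) (out : Int) : Prop := out = solution_alt board skill
instance (board : List (List Int)) (skill : List (List Int)) (out : Int) : Decidable (Spec_solution board skill out) := by unfold Spec_solution; infer_instance

-- ===== CLAIM (what is proved, stated in full; the proofs are below) =====
def Claim_equal_solution : Prop := ∀ (board : List (List Int)) (skill : List (List Int)), Dom_solution board skill → Pre_solution board skill → Spec_solution board skill (solution board skill)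


-- ===== LEMMAS AND PROOFS =====

-- cell accessor and rectangular-shape predicate used throughout the proofs
def ce (g : List (List Int)) (i j : Nat) : Int := (g.getD i []).getD j 0

def Shape (g : List (List Int)) (n m : Nat) : Prop :=
  g.length = n ∧ ∀ r ∈ g, m ≤ r.length

def pvSgn (tp d : Int) : Int := if tp = 1 then -d else d

-- per-cell contribution of one skill in A's difference array
def diffc (s : List Int) (i j : Nat) : Int :=
  match s with
  | [tp, r1, c1, r2, c2, d] =>
      pvSgn tp d * ((if (i:Int) = r1 then 1 else 0) - (if (i:Int) = r2 + 1 then 1 else 0))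
        * ((if (j:Int) = c1 then 1 else 0) - (if (j:Int) = c2 + 1 then 1 else 0))
  | _ => 0

-- per-cell contribution of one skill to the final board
def contrib (s : List Int) (i j : Nat) : Int :=
  match s with
  | [tp, r1, c1, r2, c2, d] =>
      if r1 ≤ (i:Int) ∧ (i:Int) ≤ r2 ∧ c1 ≤ (j:Int) ∧ (j:Int) ≤ c2 then pvSgn tp d else 0
  | _ => 0

def ValidSkill (n m : Nat) (s : List Int) : Prop :=
  s.length = 6 ∧
  0 ≤ s.getD 1 0 ∧ s.getD 1 0 ≤ s.getD 3 0 ∧ s.getD 3 0 < (n : Int) ∧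
  0 ≤ s.getD 2 0 ∧ s.getD 2 0 ≤ s.getD 4 0 ∧ s.getD 4 0 < (m : Int)

def rsum (g : List (List Int)) (i j : Nat) : Int := ∑ l ∈ Finset.range (j + 1), ce g i l
def csum (g : List (List Int)) (i j : Nat) : Int := ∑ k ∈ Finset.range (i + 1), ce g k j

theorem getD_set_eq_ite {α : Type} (l : List α) (i j : Nat) (x d : α) :
    (l.set i x).getD j d = if i = j ∧ i < l.length then x else l.getD j d := by
  simp only [List.getD_eq_getElem?_getD, List.getElem?_set]
  split_ifs <;> simp_all <;> omega

theorem ceGet (g : List (List Int)) (i j : Nat) : pvGetCell g (i:Int) (j:Int) = ce g i j := by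
  simp [pvGetCell, ce, PySem.List.pyGetD_natCast]

theorem addCell_eq (g : List (List Int)) (a b : Nat) (d : Int) :
    pvAddCell g (a:Int) (b:Int) d = g.set a ((g.getD a []).set b (ce g a b + d)) := by
  simp [pvAddCell, pvGetCell, ce, PySem.List.pySetD_natCast, PySem.List.pyGetD_natCast]

theorem shape_addCell {g : List (List Int)} {n m : Nat} (h : Shape g n m)
    (a b : Nat) (ha : a < n) (d : Int) :
    Shape (pvAddCell g (a:Int) (b:Int) d) n m := by
  obtain ⟨hlen, hrow⟩ := h
  rw [addCell_eq]
  refine ⟨by simp [hlen], ?_⟩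
  intro r hr
  rcases List.mem_or_eq_of_mem_set hr with hr' | rfl
  · exact hrow r hr'
  · rw [List.length_set]
    have : g.getD a [] ∈ g := by
      rw [List.getD_eq_getElem?_getD, List.getElem?_eq_getElem (by omega : a < g.length)]
      exact List.getElem_mem _
    exact hrow _ this

theorem ce_addCell {g : List (List Int)} {n m : Nat} (h : Shape g n m)
    {a b : Nat} (ha : a < n) (hb : b < m) (d : Int) (i j : Nat) :
    ce (pvAddCell g (a:Int) (b:Int) d) i j
      = if i = a ∧ j = b then ce g i j + d else ce g i j := by
  obtain ⟨hlen, hrow⟩ := h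
  have hga : g.getD a [] ∈ g := by
    rw [List.getD_eq_getElem?_getD, List.getElem?_eq_getElem (by omega : a < g.length)]
    exact List.getElem_mem _
  have hrl : m ≤ (g.getD a []).length := hrow _ hga
  rw [addCell_eq]
  unfold ce
  rw [getD_set_eq_ite]
  by_cases hia : a = i
  · subst hia
    rw [if_pos ⟨rfl, by omega⟩, getD_set_eq_ite]
    by_cases hjb : b = j
    · subst hjb
      rw [if_pos ⟨rfl, by omega⟩, if_pos ⟨rfl, rfl⟩]
    · rw [if_neg (fun hc => hjb hc.1), if_neg (fun hc => hjb hc.2.symm)]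
  · rw [if_neg (fun hc => hia hc.1), if_neg (fun hc => hia hc.1.symm)]

theorem shape_addCell' {g : List (List Int)} {n m : Nat} (h : Shape g n m)
    (x y : Int) (hx0 : 0 ≤ x) (hx : x < (n:Int)) (hy0 : 0 ≤ y) (hy : y < (m:Int)) (d : Int) :
    Shape (pvAddCell g x y d) n m := by
  rw [show x = ((x.toNat : Nat) : Int) from (Int.toNat_of_nonneg hx0).symm,
      show y = ((y.toNat : Nat) : Int) from (Int.toNat_of_nonneg hy0).symm]
  exact shape_addCell h x.toNat y.toNat (by omega) d

theorem ce_addCell' {g : List (List Int)} {n m : Nat} (h : Shape g n m)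
    (x y : Int) (hx0 : 0 ≤ x) (hx : x < (n:Int)) (hy0 : 0 ≤ y) (hy : y < (m:Int))
    (d : Int) (i j : Nat) :
    ce (pvAddCell g x y d) i j
      = if (i:Int) = x ∧ (j:Int) = y then ce g i j + d else ce g i j := by
  rw [show x = ((x.toNat : Nat) : Int) from (Int.toNat_of_nonneg hx0).symm,
      show y = ((y.toNat : Nat) : Int) from (Int.toNat_of_nonneg hy0).symm,
      ce_addCell h (by omega : x.toNat < n) (by omega : y.toNat < m) d i j]
  split_ifs <;> first | rfl | (exfalso; omega)

theorem shape_zero (n m : Nat) :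
    Shape (List.replicate (n + 1) (List.replicate (m + 1) (0:Int))) (n + 1) (m + 1) := by
  constructor
  · simp
  · intro r hr
    rw [List.eq_of_mem_replicate hr]
    simp

theorem ce_zero (n m i j : Nat) :
    ce (List.replicate (n + 1) (List.replicate (m + 1) (0:Int))) i j = 0 := by
  have h1 : (List.replicate (n + 1) (List.replicate (m + 1) (0:Int))).getD i []
      = if i < n + 1 then List.replicate (m + 1) (0:Int) else [] := by
    split_ifs with hi
    · exact List.getD_replicate _ hi
    · rw [List.getD_eq_getElem?_getD, List.getElem?_eq_none (by simp; omega)]; rfl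
  unfold ce
  rw [h1]
  split_ifs with hi
  · by_cases hj : j < m + 1
    · exact List.getD_replicate _ hj
    · rw [List.getD_eq_getElem?_getD, List.getElem?_eq_none (by simp; omega)]; rfl
  · simp

theorem exists_six (s : List Int) (h : s.length = 6) :
    ∃ a b c d e f, s = [a, b, c, d, e, f] := by
  rcases s with _ | ⟨a, _ | ⟨b, _ | ⟨c, _ | ⟨d, _ | ⟨e, _ | ⟨f, _ | ⟨g, s⟩⟩⟩⟩⟩⟩⟩ <;>
    simp_all


-- ===== A-side: the skill loop builds the difference array =====
theorem shape_skillStep {g : List (List Int)} {n m : Nat} (h : Shape g (n+1) (m+1))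
    {s : List Int} (hs : ValidSkill n m s) : Shape (pvSkillStep g s) (n+1) (m+1) := by
  obtain ⟨hlen6, hv⟩ := hs
  obtain ⟨tp, r1, c1, r2, c2, d, rfl⟩ := exists_six _ hlen6
  simp only [List.getD_cons_succ, List.getD_cons_zero] at hv
  obtain ⟨h1, h2, h3, h4, h5, h6⟩ := hv
  have e1 : ((r1.toNat : Nat) : Int) = r1 := Int.toNat_of_nonneg h1
  have e2 : ((r2.toNat + 1 : Nat) : Int) = r2 + 1 := by push_cast; rw [Int.toNat_of_nonneg (by omega)]
  have e3 : ((c1.toNat : Nat) : Int) = c1 := Int.toNat_of_nonneg h4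
  have e4 : ((c2.toNat + 1 : Nat) : Int) = c2 + 1 := by push_cast; rw [Int.toNat_of_nonneg (by omega)]
  have hA1 : r1.toNat < n + 1 := by omega
  have hA2 : r2.toNat + 1 < n + 1 := by omega
  have hB1 : c1.toNat < m + 1 := by omega
  have hB2 : c2.toNat + 1 < m + 1 := by omega
  have hstep : pvSkillStep g [tp, r1, c1, r2, c2, d]
      = pvAddCell (pvAddCell (pvAddCell (pvAddCell g ((r1.toNat : Nat) : Int) ((c1.toNat : Nat) : Int) (pvSgn tp d))
          ((r1.toNat : Nat) : Int) ((c2.toNat + 1 : Nat) : Int) (-pvSgn tp d))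
          ((r2.toNat + 1 : Nat) : Int) ((c1.toNat : Nat) : Int) (-pvSgn tp d))
          ((r2.toNat + 1 : Nat) : Int) ((c2.toNat + 1 : Nat) : Int) (pvSgn tp d) := by
    simp only [pvSkillStep, pvSgn, e1, e2, e3, e4]
  have s1 := shape_addCell h r1.toNat c1.toNat hA1 (pvSgn tp d)
  have s2 := shape_addCell s1 r1.toNat (c2.toNat + 1) hA1 (-pvSgn tp d)
  have s3 := shape_addCell s2 (r2.toNat + 1) c1.toNat hA2 (-pvSgn tp d)
  rw [hstep]
  exact shape_addCell s3 (r2.toNat + 1) (c2.toNat + 1) hA2 (pvSgn tp d)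

theorem ce_skillStep {g : List (List Int)} {n m : Nat} (h : Shape g (n+1) (m+1))
    {s : List Int} (hs : ValidSkill n m s) (i j : Nat) :
    ce (pvSkillStep g s) i j = ce g i j + diffc s i j := by
  obtain ⟨hlen6, hv⟩ := hs
  obtain ⟨tp, r1, c1, r2, c2, d, rfl⟩ := exists_six _ hlen6
  simp only [List.getD_cons_succ, List.getD_cons_zero] at hv
  obtain ⟨h1, h2, h3, h4, h5, h6⟩ := hv
  have e1 : ((r1.toNat : Nat) : Int) = r1 := Int.toNat_of_nonneg h1
  have e2 : ((r2.toNat + 1 : Nat) : Int) = r2 + 1 := by push_cast; rw [Int.toNat_of_nonneg (by omega)]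
  have e3 : ((c1.toNat : Nat) : Int) = c1 := Int.toNat_of_nonneg h4
  have e4 : ((c2.toNat + 1 : Nat) : Int) = c2 + 1 := by push_cast; rw [Int.toNat_of_nonneg (by omega)]
  have hA1 : r1.toNat < n + 1 := by omega
  have hA2 : r2.toNat + 1 < n + 1 := by omega
  have hB1 : c1.toNat < m + 1 := by omega
  have hB2 : c2.toNat + 1 < m + 1 := by omega
  have hstep : pvSkillStep g [tp, r1, c1, r2, c2, d]
      = pvAddCell (pvAddCell (pvAddCell (pvAddCell g ((r1.toNat : Nat) : Int) ((c1.toNat : Nat) : Int) (pvSgn tp d))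
          ((r1.toNat : Nat) : Int) ((c2.toNat + 1 : Nat) : Int) (-pvSgn tp d))
          ((r2.toNat + 1 : Nat) : Int) ((c1.toNat : Nat) : Int) (-pvSgn tp d))
          ((r2.toNat + 1 : Nat) : Int) ((c2.toNat + 1 : Nat) : Int) (pvSgn tp d) := by
    simp only [pvSkillStep, pvSgn, e1, e2, e3, e4]
  have s1 := shape_addCell h r1.toNat c1.toNat hA1 (pvSgn tp d)
  have s2 := shape_addCell s1 r1.toNat (c2.toNat + 1) hA1 (-pvSgn tp d)
  have s3 := shape_addCell s2 (r2.toNat + 1) c1.toNat hA2 (-pvSgn tp d)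
  rw [hstep]
  rw [ce_addCell s3 hA2 hB2, ce_addCell s2 hA2 hB1, ce_addCell s1 hA1 hB2,
      ce_addCell h hA1 hB1]
  simp only [diffc]
  split_ifs <;> (try ring) <;> (exfalso; omega)

theorem shape_foldSkill {n m : Nat} (skill : List (List Int))
    {g : List (List Int)} (h : Shape g (n+1) (m+1))
    (hv : ∀ s ∈ skill, ValidSkill n m s) :
    Shape (skill.foldl pvSkillStep g) (n+1) (m+1) := by
  induction skill generalizing g with
  | nil => exact h
  | cons s skill ih =>
    rw [List.foldl_cons]
    exact ih (shape_skillStep h (hv s List.mem_cons_self))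
      (fun t ht => hv t (List.mem_cons_of_mem _ ht))

theorem ce_foldSkill {n m : Nat} (skill : List (List Int))
    {g : List (List Int)} (h : Shape g (n+1) (m+1))
    (hv : ∀ s ∈ skill, ValidSkill n m s) (i j : Nat) :
    ce (skill.foldl pvSkillStep g) i j
      = ce g i j + (skill.map (fun s => diffc s i j)).sum := by
  induction skill generalizing g with
  | nil => simp
  | cons s skill ih =>
    rw [List.foldl_cons, ih (shape_skillStep h (hv s List.mem_cons_self))
      (fun t ht => hv t (List.mem_cons_of_mem _ ht)), ce_skillStep h (hv s List.mem_cons_self)]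
    simp only [List.map_cons, List.sum_cons]
    ring

-- ===== A-side: the two prefix-sum passes =====
theorem rowPass {n m : Nat} (k : Nat) (hk : k < n + 1) (t : Nat) (ht : t ≤ m)
    {g : List (List Int)} (h : Shape g (n+1) (m+1)) :
    Shape ((PySem.List.pyRange 1 ((t:Int) + 1) 1).foldl
        (fun nb j => pvAddCell nb (k:Int) j (pvGetCell nb (k:Int) (j - 1))) g) (n+1) (m+1)
    ∧ ∀ a b : Nat, ce ((PySem.List.pyRange 1 ((t:Int) + 1) 1).foldl
        (fun nb j => pvAddCell nb (k:Int) j (pvGetCell nb (k:Int) (j - 1))) g) a b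
      = if a = k ∧ 1 ≤ b ∧ b ≤ t then rsum g a b else ce g a b := by
  induction t with
  | zero =>
    rw [show ((0:Nat):Int) + 1 = 1 by norm_num, PySem.List.pyRange_one_eq_nil le_rfl,
        List.foldl_nil]
    exact ⟨h, fun a b => by rw [if_neg (by omega)]⟩
  | succ t ih =>
    obtain ⟨ihS, ihC⟩ := ih (by omega)
    have hc : ((t + 1 : Nat) : Int) + 1 = ((t : Int) + 1) + 1 := by push_cast; ring
    rw [hc, PySem.List.pyRange_one_succ_right (by omega), List.foldl_append,
        List.foldl_cons, List.foldl_nil]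
    have hc3 : ((t : Int) + 1 - 1) = ((t : Nat) : Int) := by push_cast; ring
    rw [hc3, ceGet]
    have hval : ce ((PySem.List.pyRange 1 ((t:Int) + 1) 1).foldl
        (fun nb j => pvAddCell nb (k:Int) j (pvGetCell nb (k:Int) (j - 1))) g) k t
        = rsum g k t := by
      rw [ihC k t]
      rcases Nat.eq_zero_or_pos t with h0 | h0
      · subst h0
        rw [if_neg (by omega), rsum, Finset.sum_range_one]
      · rw [if_pos ⟨rfl, h0, le_rfl⟩]
    rw [hval]
    refine ⟨shape_addCell' ihS (k:Int) ((t:Int)+1) (by omega) (by push_cast; omega)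
      (by omega) (by push_cast; omega) _, fun a b => ?_⟩
    rw [ce_addCell' ihS (k:Int) ((t:Int)+1) (by omega) (by push_cast; omega)
      (by omega) (by push_cast; omega) _ a b]
    by_cases hab : a = k ∧ b = t + 1
    · obtain ⟨rfl, rfl⟩ := hab
      rw [if_pos (by push_cast; omega), ihC, if_neg (by omega),
          if_pos ⟨rfl, by omega, le_rfl⟩, rsum, rsum]
      simp only [Finset.sum_range_succ]
      ring
    · rw [if_neg (by push_cast; omega), ihC a b]
      by_cases hcond : a = k ∧ 1 ≤ b ∧ b ≤ t
      · rw [if_pos hcond, if_pos (by omega)]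
      · rw [if_neg hcond, if_neg (by omega)]

theorem rowPassAll {n m : Nat} (K : Nat) (hK : K ≤ n + 1)
    {g : List (List Int)} (h : Shape g (n+1) (m+1)) :
    Shape ((PySem.List.pyRange 0 (K:Int) 1).foldl (fun nb i =>
        (PySem.List.pyRange 1 ((m:Int) + 1) 1).foldl
          (fun nb j => pvAddCell nb i j (pvGetCell nb i (j - 1))) nb) g) (n+1) (m+1)
    ∧ ∀ a b : Nat, b ≤ m → ce ((PySem.List.pyRange 0 (K:Int) 1).foldl (fun nb i =>
        (PySem.List.pyRange 1 ((m:Int) + 1) 1).foldl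
          (fun nb j => pvAddCell nb i j (pvGetCell nb i (j - 1))) nb) g) a b
      = if a < K then rsum g a b else ce g a b := by
  induction K with
  | zero =>
    rw [show ((0:Nat):Int) = 0 by norm_num, PySem.List.pyRange_one_eq_nil le_rfl,
        List.foldl_nil]
    exact ⟨h, fun a b _ => by rw [if_neg (by omega)]⟩
  | succ K ih =>
    obtain ⟨ihS, ihC⟩ := ih (by omega)
    have hc : ((K + 1 : Nat) : Int) = (K : Int) + 1 := by push_cast; ring
    rw [hc, PySem.List.pyRange_one_succ_right (a := 0) (b := (K:Int)) (by omega),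
        List.foldl_append, List.foldl_cons, List.foldl_nil]
    set GK := (PySem.List.pyRange 0 (K:Int) 1).foldl (fun nb i =>
        (PySem.List.pyRange 1 ((m:Int) + 1) 1).foldl
          (fun nb j => pvAddCell nb i j (pvGetCell nb i (j - 1))) nb) g with hGK
    obtain ⟨S', C'⟩ := rowPass (n := n) (m := m) K (by omega) m le_rfl ihS
    refine ⟨S', fun a b hb => ?_⟩
    rw [C' a b]
    have hge : ∀ l, l ≤ m → ce GK K l = ce g K l := fun l hl => by
      rw [ihC K l hl, if_neg (by omega)]
    by_cases hA : a = K
    · subst hA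
      by_cases hb1 : 1 ≤ b
      · rw [if_pos ⟨rfl, hb1, hb⟩, if_pos (by omega)]
        exact Finset.sum_congr rfl (fun l hl => hge l (by
          simp only [Finset.mem_range] at hl; omega))
      · have hb0 : b = 0 := by omega
        subst hb0
        rw [if_neg (by omega), if_pos (by omega), hge 0 (by omega), rsum,
            Finset.sum_range_one]
    · rw [if_neg (by omega), ihC a b hb]
      by_cases h2 : a < K
      · rw [if_pos h2, if_pos (by omega)]
      · rw [if_neg h2, if_neg (by omega)]

theorem colPass {n m : Nat} (k : Nat) (hk : k < m + 1) (t : Nat) (ht : t ≤ n)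
    {g : List (List Int)} (h : Shape g (n+1) (m+1)) :
    Shape ((PySem.List.pyRange 1 ((t:Int) + 1) 1).foldl
        (fun nb i => pvAddCell nb i (k:Int) (pvGetCell nb (i - 1) (k:Int))) g) (n+1) (m+1)
    ∧ ∀ a b : Nat, ce ((PySem.List.pyRange 1 ((t:Int) + 1) 1).foldl
        (fun nb i => pvAddCell nb i (k:Int) (pvGetCell nb (i - 1) (k:Int))) g) a b
      = if b = k ∧ 1 ≤ a ∧ a ≤ t then csum g a b else ce g a b := by
  induction t with
  | zero =>
    rw [show ((0:Nat):Int) + 1 = 1 by norm_num, PySem.List.pyRange_one_eq_nil le_rfl,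
        List.foldl_nil]
    exact ⟨h, fun a b => by rw [if_neg (by omega)]⟩
  | succ t ih =>
    obtain ⟨ihS, ihC⟩ := ih (by omega)
    have hc : ((t + 1 : Nat) : Int) + 1 = ((t : Int) + 1) + 1 := by push_cast; ring
    rw [hc, PySem.List.pyRange_one_succ_right (a := 1) (b := (t:Int) + 1) (by omega),
        List.foldl_append, List.foldl_cons, List.foldl_nil]
    have hc3 : ((t : Int) + 1 - 1) = ((t : Nat) : Int) := by push_cast; ring
    rw [hc3, ceGet]
    have hval : ce ((PySem.List.pyRange 1 ((t:Int) + 1) 1).foldl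
        (fun nb i => pvAddCell nb i (k:Int) (pvGetCell nb (i - 1) (k:Int))) g) t k
        = csum g t k := by
      rw [ihC t k]
      rcases Nat.eq_zero_or_pos t with h0 | h0
      · subst h0
        rw [if_neg (by omega), csum, Finset.sum_range_one]
      · rw [if_pos ⟨rfl, h0, le_rfl⟩]
    rw [hval]
    refine ⟨shape_addCell' ihS ((t:Int)+1) (k:Int) (by omega) (by push_cast; omega)
      (by omega) (by push_cast; omega) _, fun a b => ?_⟩
    rw [ce_addCell' ihS ((t:Int)+1) (k:Int) (by omega) (by push_cast; omega)
      (by omega) (by push_cast; omega) _ a b]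
    by_cases hab : a = t + 1 ∧ b = k
    · obtain ⟨rfl, rfl⟩ := hab
      rw [if_pos (by push_cast; omega), ihC, if_neg (by omega),
          if_pos ⟨rfl, by omega, le_rfl⟩, csum, csum]
      simp only [Finset.sum_range_succ]
      ring
    · rw [if_neg (by push_cast; omega), ihC a b]
      by_cases hcond : b = k ∧ 1 ≤ a ∧ a ≤ t
      · rw [if_pos hcond, if_pos (by omega)]
      · rw [if_neg hcond, if_neg (by omega)]

theorem colPassAll {n m : Nat} (K : Nat) (hK : K ≤ m + 1)
    {g : List (List Int)} (h : Shape g (n+1) (m+1)) :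
    Shape ((PySem.List.pyRange 0 (K:Int) 1).foldl (fun nb j =>
        (PySem.List.pyRange 1 ((n:Int) + 1) 1).foldl
          (fun nb i => pvAddCell nb i j (pvGetCell nb (i - 1) j)) nb) g) (n+1) (m+1)
    ∧ ∀ a b : Nat, a ≤ n → ce ((PySem.List.pyRange 0 (K:Int) 1).foldl (fun nb j =>
        (PySem.List.pyRange 1 ((n:Int) + 1) 1).foldl
          (fun nb i => pvAddCell nb i j (pvGetCell nb (i - 1) j)) nb) g) a b
      = if b < K then csum g a b else ce g a b := by
  induction K with
  | zero =>
    rw [show ((0:Nat):Int) = 0 by norm_num, PySem.List.pyRange_one_eq_nil le_rfl,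
        List.foldl_nil]
    exact ⟨h, fun a b _ => by rw [if_neg (by omega)]⟩
  | succ K ih =>
    obtain ⟨ihS, ihC⟩ := ih (by omega)
    have hc : ((K + 1 : Nat) : Int) = (K : Int) + 1 := by push_cast; ring
    rw [hc, PySem.List.pyRange_one_succ_right (a := 0) (b := (K:Int)) (by omega),
        List.foldl_append, List.foldl_cons, List.foldl_nil]
    set GK := (PySem.List.pyRange 0 (K:Int) 1).foldl (fun nb j =>
        (PySem.List.pyRange 1 ((n:Int) + 1) 1).foldl
          (fun nb i => pvAddCell nb i j (pvGetCell nb (i - 1) j)) nb) g with hGK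
    obtain ⟨S', C'⟩ := colPass (n := n) (m := m) K (by omega) n le_rfl ihS
    refine ⟨S', fun a b ha => ?_⟩
    rw [C' a b]
    have hge : ∀ l, l ≤ n → ce GK l K = ce g l K := fun l hl => by
      rw [ihC l K hl, if_neg (by omega)]
    by_cases hB : b = K
    · subst hB
      by_cases ha1 : 1 ≤ a
      · rw [if_pos ⟨rfl, ha1, ha⟩, if_pos (by omega)]
        exact Finset.sum_congr rfl (fun l hl => hge l (by
          simp only [Finset.mem_range] at hl; omega))
      · have ha0 : a = 0 := by omega
        subst ha0
        rw [if_neg (by omega), if_pos (by omega), hge 0 (by omega), csum,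
            Finset.sum_range_one]
    · rw [if_neg (by omega), ihC a b ha]
      by_cases h2 : b < K
      · rw [if_pos h2, if_pos (by omega)]
      · rw [if_neg h2, if_neg (by omega)]

-- ===== sum algebra =====
theorem sumInd (a : Int) (i : Nat) :
    (∑ k ∈ Finset.range (i + 1), if (k:Int) = a then (1:Int) else 0)
      = if 0 ≤ a ∧ a ≤ (i:Int) then 1 else 0 := by
  induction i with
  | zero =>
    rw [Finset.sum_range_one]
    split_ifs <;> first | rfl | (exfalso; omega)
  | succ i ih =>
    rw [Finset.sum_range_succ, ih]
    split_ifs <;> first | ring1 | (exfalso; omega)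

theorem sumE (r1 r2 : Int) (i : Nat) (h1 : 0 ≤ r1) (h2 : r1 ≤ r2) :
    (∑ k ∈ Finset.range (i + 1),
        ((if (k:Int) = r1 then (1:Int) else 0) - (if (k:Int) = r2 + 1 then 1 else 0)))
      = if r1 ≤ (i:Int) ∧ (i:Int) ≤ r2 then 1 else 0 := by
  rw [Finset.sum_sub_distrib, sumInd, sumInd]
  split_ifs <;> first | ring1 | (exfalso; omega)

theorem sum_sum_diffc {n m : Nat} {s : List Int} (hs : ValidSkill n m s) (i j : Nat) :
    (∑ k ∈ Finset.range (i + 1), ∑ l ∈ Finset.range (j + 1), diffc s k l)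
      = contrib s i j := by
  obtain ⟨hlen6, hv⟩ := hs
  obtain ⟨tp, r1, c1, r2, c2, d, rfl⟩ := exists_six _ hlen6
  simp only [List.getD_cons_succ, List.getD_cons_zero] at hv
  obtain ⟨h1, h2, h3, h4, h5, h6⟩ := hv
  simp only [diffc, contrib]
  have hcol : ∀ k : Nat, (∑ l ∈ Finset.range (j + 1),
      pvSgn tp d * ((if (k:Int) = r1 then (1:Int) else 0) - (if (k:Int) = r2 + 1 then 1 else 0))
        * ((if (l:Int) = c1 then 1 else 0) - (if (l:Int) = c2 + 1 then 1 else 0)))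
      = pvSgn tp d * ((if (k:Int) = r1 then (1:Int) else 0) - (if (k:Int) = r2 + 1 then 1 else 0))
        * (if c1 ≤ (j:Int) ∧ (j:Int) ≤ c2 then 1 else 0) := by
    intro k
    rw [← Finset.mul_sum, sumE c1 c2 j h4 h5]
  calc (∑ k ∈ Finset.range (i + 1), ∑ l ∈ Finset.range (j + 1),
        pvSgn tp d * ((if (k:Int) = r1 then (1:Int) else 0) - (if (k:Int) = r2 + 1 then 1 else 0))
          * ((if (l:Int) = c1 then 1 else 0) - (if (l:Int) = c2 + 1 then 1 else 0)))
      = ∑ k ∈ Finset.range (i + 1),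
          pvSgn tp d * ((if (k:Int) = r1 then (1:Int) else 0) - (if (k:Int) = r2 + 1 then 1 else 0))
            * (if c1 ≤ (j:Int) ∧ (j:Int) ≤ c2 then 1 else 0) :=
        Finset.sum_congr rfl (fun k _ => hcol k)
    _ = (pvSgn tp d * (if c1 ≤ (j:Int) ∧ (j:Int) ≤ c2 then 1 else 0))
          * ∑ k ∈ Finset.range (i + 1),
            ((if (k:Int) = r1 then (1:Int) else 0) - (if (k:Int) = r2 + 1 then 1 else 0)) := by
        rw [Finset.mul_sum]
        exact Finset.sum_congr rfl (fun k _ => by ring)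
    _ = (pvSgn tp d * (if c1 ≤ (j:Int) ∧ (j:Int) ≤ c2 then 1 else 0))
          * (if r1 ≤ (i:Int) ∧ (i:Int) ≤ r2 then 1 else 0) := by
        rw [sumE r1 r2 i h1 h2]
    _ = (if r1 ≤ (i:Int) ∧ (i:Int) ≤ r2 ∧ c1 ≤ (j:Int) ∧ (j:Int) ≤ c2
          then pvSgn tp d else 0) := by
        split_ifs <;> first | ring1 | (exfalso; omega)

theorem sum_list_swap (L : List (List Int)) (K : Nat) (f : List Int → Nat → Int) :
    (∑ k ∈ Finset.range K, (L.map (fun s => f s k)).sum)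
      = (L.map (fun s => ∑ k ∈ Finset.range K, f s k)).sum := by
  induction L with
  | nil => simp
  | cons s L ih =>
    simp only [List.map_cons, List.sum_cons, Finset.sum_add_distrib, ih]

-- ===== B-side =====
theorem bInner {n m : Nat} {g : List (List Int)} (h : Shape g n m)
    (x : Int) (hx0 : 0 ≤ x) (hx : x < (n:Int)) (c1 : Int) (hc1 : 0 ≤ c1)
    (t : Nat) (ht : c1 + t ≤ (m:Int)) (d : Int) :
    Shape ((PySem.List.pyRange c1 (c1 + (t:Int)) 1).foldl
        (fun b j => pvAddCell b x j d) g) n m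
    ∧ ∀ a b : Nat, ce ((PySem.List.pyRange c1 (c1 + (t:Int)) 1).foldl
        (fun b j => pvAddCell b x j d) g) a b
      = if (a:Int) = x ∧ c1 ≤ (b:Int) ∧ (b:Int) < c1 + t then ce g a b + d else ce g a b := by
  induction t with
  | zero =>
    rw [show c1 + ((0:Nat):Int) = c1 by push_cast; ring,
        PySem.List.pyRange_one_eq_nil le_rfl, List.foldl_nil]
    exact ⟨h, fun a b => by rw [if_neg (by push_cast; omega)]⟩
  | succ t ih =>
    obtain ⟨ihS, ihC⟩ := ih (by push_cast at ht ⊢; omega)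
    have hc : c1 + ((t + 1 : Nat) : Int) = (c1 + (t:Int)) + 1 := by push_cast; ring
    rw [hc, PySem.List.pyRange_one_succ_right (a := c1) (b := c1 + (t:Int)) (by omega),
        List.foldl_append, List.foldl_cons, List.foldl_nil]
    refine ⟨shape_addCell' ihS x (c1 + (t:Int)) hx0 hx (by omega)
      (by push_cast at ht ⊢; omega) d, fun a b => ?_⟩
    rw [ce_addCell' ihS x (c1 + (t:Int)) hx0 hx (by omega)
      (by push_cast at ht ⊢; omega) d a b, ihC a b]
    push_cast
    split_ifs <;> first | ring1 | (exfalso; omega)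

theorem bOuter {n m : Nat} {g : List (List Int)} (h : Shape g n m)
    (r1 : Int) (hr1 : 0 ≤ r1) (u : Nat) (hu : r1 + u ≤ (n:Int))
    (c1 c2 : Int) (hc1 : 0 ≤ c1) (hc12 : c1 ≤ c2) (hc2 : c2 < (m:Int)) (d : Int) :
    Shape ((PySem.List.pyRange r1 (r1 + (u:Int)) 1).foldl (fun b i =>
        (PySem.List.pyRange c1 (c2 + 1) 1).foldl
          (fun b j => pvAddCell b i j d) b) g) n m
    ∧ ∀ a b : Nat, ce ((PySem.List.pyRange r1 (r1 + (u:Int)) 1).foldl (fun b i =>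
        (PySem.List.pyRange c1 (c2 + 1) 1).foldl
          (fun b j => pvAddCell b i j d) b) g) a b
      = if (r1 ≤ (a:Int) ∧ (a:Int) < r1 + u) ∧ (c1 ≤ (b:Int) ∧ (b:Int) ≤ c2)
          then ce g a b + d else ce g a b := by
  induction u with
  | zero =>
    rw [show r1 + ((0:Nat):Int) = r1 by push_cast; ring,
        PySem.List.pyRange_one_eq_nil le_rfl, List.foldl_nil]
    exact ⟨h, fun a b => by rw [if_neg (by push_cast; omega)]⟩
  | succ u ih =>
    obtain ⟨ihS, ihC⟩ := ih (by push_cast at hu ⊢; omega)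
    have hc : r1 + ((u + 1 : Nat) : Int) = (r1 + (u:Int)) + 1 := by push_cast; ring
    rw [hc, PySem.List.pyRange_one_succ_right (a := r1) (b := r1 + (u:Int)) (by omega),
        List.foldl_append, List.foldl_cons, List.foldl_nil]
    have hT : c1 + (((c2 + 1 - c1).toNat : Nat) : Int) = c2 + 1 := by omega
    obtain ⟨S', C'⟩ := bInner ihS (r1 + (u:Int)) (by omega)
      (by push_cast at hu ⊢; omega) c1 hc1 (c2 + 1 - c1).toNat (by omega) d
    rw [hT] at S' C'
    refine ⟨S', fun a b => ?_⟩
    rw [C' a b, ihC a b]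
    push_cast
    split_ifs <;> first | ring1 | (exfalso; omega)

theorem shape_bStep {n m : Nat} {g : List (List Int)} (h : Shape g n m)
    {s : List Int} (hs : ValidSkill n m s) : Shape (pvBSkillStep g s) n m := by
  obtain ⟨hlen6, hv⟩ := hs
  obtain ⟨tp, r1, c1, r2, c2, d, rfl⟩ := exists_six _ hlen6
  simp only [List.getD_cons_succ, List.getD_cons_zero] at hv
  obtain ⟨h1, h2, h3, h4, h5, h6⟩ := hv
  have hU : r1 + (((r2 + 1 - r1).toNat : Nat) : Int) = r2 + 1 := by omega
  have hstep : pvBSkillStep g [tp, r1, c1, r2, c2, d]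
      = (PySem.List.pyRange r1 (r1 + (((r2 + 1 - r1).toNat : Nat) : Int)) 1).foldl (fun b i =>
          (PySem.List.pyRange c1 (c2 + 1) 1).foldl
            (fun b j => pvAddCell b i j (pvSgn tp d)) b) g := by
    simp only [pvBSkillStep, pvSgn, hU]
  obtain ⟨S', C'⟩ := bOuter h r1 h1 (r2 + 1 - r1).toNat (by omega) c1 c2 h4 h5 h6 (pvSgn tp d)
  rw [hstep]
  exact S'

theorem ce_bStep {n m : Nat} {g : List (List Int)} (h : Shape g n m)
    {s : List Int} (hs : ValidSkill n m s) (i j : Nat) :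
    ce (pvBSkillStep g s) i j = ce g i j + contrib s i j := by
  obtain ⟨hlen6, hv⟩ := hs
  obtain ⟨tp, r1, c1, r2, c2, d, rfl⟩ := exists_six _ hlen6
  simp only [List.getD_cons_succ, List.getD_cons_zero] at hv
  obtain ⟨h1, h2, h3, h4, h5, h6⟩ := hv
  have hU : r1 + (((r2 + 1 - r1).toNat : Nat) : Int) = r2 + 1 := by omega
  have hstep : pvBSkillStep g [tp, r1, c1, r2, c2, d]
      = (PySem.List.pyRange r1 (r1 + (((r2 + 1 - r1).toNat : Nat) : Int)) 1).foldl (fun b i =>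
          (PySem.List.pyRange c1 (c2 + 1) 1).foldl
            (fun b j => pvAddCell b i j (pvSgn tp d)) b) g := by
    simp only [pvBSkillStep, pvSgn, hU]
  obtain ⟨S', C'⟩ := bOuter h r1 h1 (r2 + 1 - r1).toNat (by omega) c1 c2 h4 h5 h6 (pvSgn tp d)
  rw [hstep, C' i j]
  simp only [contrib, hU]
  split_ifs <;> first | ring1 | (exfalso; omega)

theorem shape_foldB {n m : Nat} (skill : List (List Int))
    {g : List (List Int)} (h : Shape g n m)
    (hv : ∀ s ∈ skill, ValidSkill n m s) :
    Shape (skill.foldl pvBSkillStep g) n m := by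
  induction skill generalizing g with
  | nil => exact h
  | cons s skill ih =>
    rw [List.foldl_cons]
    exact ih (shape_bStep h (hv s List.mem_cons_self))
      (fun t ht => hv t (List.mem_cons_of_mem _ ht))

theorem ce_foldB {n m : Nat} (skill : List (List Int))
    {g : List (List Int)} (h : Shape g n m)
    (hv : ∀ s ∈ skill, ValidSkill n m s) (i j : Nat) :
    ce (skill.foldl pvBSkillStep g) i j
      = ce g i j + (skill.map (fun s => contrib s i j)).sum := by
  induction skill generalizing g with
  | nil => simp
  | cons s skill ih =>
    rw [List.foldl_cons, ih (shape_bStep h (hv s List.mem_cons_self))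
      (fun t ht => hv t (List.mem_cons_of_mem _ ht)), ce_bStep h (hv s List.mem_cons_self)]
    simp only [List.map_cons, List.sum_cons]
    ring

-- ===== counting =====
theorem countFoldIf (K : Nat) (P : Nat → Prop) [DecidablePred P] (init : Int) :
    (List.range K).foldl (fun a k => if P k then a + 1 else a) init
      = init + ∑ k ∈ Finset.range K, (if P k then (1:Int) else 0) := by
  induction K generalizing init with
  | zero => simp
  | succ K ih =>
    rw [List.range_succ, List.foldl_append, List.foldl_cons, List.foldl_nil, ih,
        Finset.sum_range_succ]
    split_ifs <;> ring

theorem rowCount (row : List Int) (init : Int) :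
    row.foldl (fun a v => if v > 0 then a + 1 else a) init
      = init + ∑ j ∈ Finset.range row.length, (if row.getD j 0 > 0 then (1:Int) else 0) := by
  induction row generalizing init with
  | nil => simp
  | cons v row ih =>
    rw [List.foldl_cons, ih, List.length_cons, Finset.sum_range_succ']
    simp only [List.getD_cons_succ, List.getD_cons_zero]
    split_ifs <;> ring

theorem gridCount (g : List (List Int)) (m : Nat) (hm : ∀ r ∈ g, m ≤ r.length) (init : Int) :
    g.foldl (fun a row => (row.take m).foldl
        (fun a v => if v > 0 then a + 1 else a) a) init
      = init + ∑ i ∈ Finset.range g.length, ∑ j ∈ Finset.range m,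
          (if ce g i j > 0 then (1:Int) else 0) := by
  induction g generalizing init with
  | nil => simp
  | cons row g ih =>
    rw [List.foldl_cons, rowCount (row.take m) init,
        ih (fun r hr => hm r (List.mem_cons_of_mem _ hr)), List.length_cons,
        Finset.sum_range_succ']
    have hrow : (row.take m).length = m := by
      simp [hm row List.mem_cons_self]
    rw [hrow]
    have htake : ∀ j ∈ Finset.range m,
        (if (row.take m).getD j 0 > 0 then (1:Int) else 0)
          = (if ce (row :: g) 0 j > 0 then (1:Int) else 0) := by
      intro j hj
      simp only [Finset.mem_range] at hj
      simp [ce, List.getD_eq_getElem?_getD, List.getElem?_take, hj]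
    rw [Finset.sum_congr rfl htake]
    simp only [ce, List.getD_cons_succ]
    ring

theorem doubleCountF (N M : Nat) (F : Nat → Nat → Int) (init : Int) :
    (List.range N).foldl (fun ans i => (List.range M).foldl
        (fun ans j => if F i j > 0 then ans + 1 else ans) ans) init
      = init + ∑ i ∈ Finset.range N, ∑ j ∈ Finset.range M,
          (if F i j > 0 then (1:Int) else 0) := by
  induction N generalizing init with
  | zero => simp
  | succ N ih =>
    rw [List.range_succ, List.foldl_append, List.foldl_cons, List.foldl_nil, ih,
        countFoldIf M (fun j => F N j > 0), Finset.sum_range_succ]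
    ring

-- ===== VERDICT (by name: the statement is the Claim_ definition above) =====
theorem solution_spec : Claim_equal_solution := by
  intro board skill _ hpre
  unfold Spec_solution solution solution_alt
  obtain ⟨hne, hrect, hsk⟩ := hpre
  have hj : PySem.List.pyGetD board 0 [] = board.headD [] := by
    rcases board with _ | ⟨r0, rest⟩
    · exact absurd rfl hne
    · simp [PySem.List.pyGetD_zero]
  simp only [hj]
  set m := (board.headD []).length with hm
  set n := board.length with hn
  have hvA : ∀ s ∈ skill, ValidSkill n m s := hsk
  set nb0 := List.replicate (n + 1) (List.replicate (m + 1) (0:Int)) with hnb0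
  set nb1 := skill.foldl pvSkillStep nb0 with hnb1
  set nb2 := (PySem.List.pyRange 0 ((n:Int) + 1) 1).foldl (fun nb i =>
      (PySem.List.pyRange 1 ((m:Int) + 1) 1).foldl
        (fun nb j => pvAddCell nb i j (pvGetCell nb i (j - 1))) nb) nb1 with hnb2
  set nb3 := (PySem.List.pyRange 0 ((m:Int) + 1) 1).foldl (fun nb j =>
      (PySem.List.pyRange 1 ((n:Int) + 1) 1).foldl
        (fun nb i => pvAddCell nb i j (pvGetCell nb (i - 1) j)) nb) nb2 with hnb3
  set bd := skill.foldl pvBSkillStep board with hbd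
  -- A-side characterizations
  have sh1 : Shape nb1 (n + 1) (m + 1) := shape_foldSkill skill (shape_zero n m) hvA
  have hce1 : ∀ i j : Nat, ce nb1 i j = (skill.map (fun s => diffc s i j)).sum := by
    intro i j
    rw [hnb1, ce_foldSkill skill (shape_zero n m) hvA, ce_zero]
    ring
  have hrow := rowPassAll (n := n) (m := m) (n + 1) le_rfl sh1
  rw [show (((n:Nat) + 1 : Nat) : Int) = (n:Int) + 1 by push_cast; ring, ← hnb2] at hrow
  obtain ⟨sh2, hc2⟩ := hrow
  have hcol := colPassAll (n := n) (m := m) (m + 1) le_rfl sh2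
  rw [show (((m:Nat) + 1 : Nat) : Int) = (m:Int) + 1 by push_cast; ring, ← hnb3] at hcol
  obtain ⟨sh3, hc3⟩ := hcol
  have hD : ∀ i j : Nat, i < n → j < m →
      ce nb3 i j = (skill.map (fun s => contrib s i j)).sum := by
    intro i j hi hj'
    rw [hc3 i j (by omega), if_pos (by omega)]
    calc csum nb2 i j
        = ∑ k ∈ Finset.range (i + 1), ∑ l ∈ Finset.range (j + 1),
            (skill.map (fun s => diffc s k l)).sum := by
          refine Finset.sum_congr rfl (fun k hk => ?_)
          simp only [Finset.mem_range] at hk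
          rw [hc2 k j (by omega), if_pos (by omega)]
          exact Finset.sum_congr rfl (fun l _ => hce1 k l)
      _ = ∑ k ∈ Finset.range (i + 1),
            (skill.map (fun s => ∑ l ∈ Finset.range (j + 1), diffc s k l)).sum :=
          Finset.sum_congr rfl (fun k _ => sum_list_swap skill (j + 1) (fun s l => diffc s k l))
      _ = (skill.map (fun s => ∑ k ∈ Finset.range (i + 1),
            ∑ l ∈ Finset.range (j + 1), diffc s k l)).sum :=
          sum_list_swap skill (i + 1) (fun s k => ∑ l ∈ Finset.range (j + 1), diffc s k l)
      _ = (skill.map (fun s => contrib s i j)).sum :=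
          congrArg List.sum (List.map_congr_left (fun s hs => sum_sum_diffc (hvA s hs) i j))
  -- B-side characterization
  have shB0 : Shape board n m := ⟨rfl, hrect⟩
  have hslice : ∀ row : List Int, PySem.List.slice row none (some ((m:Nat):Int)) = row.take m :=
    fun row => PySem.List.slice_to_natCast row m
  have shB : Shape bd n m := shape_foldB skill shB0 hvA
  have hceB : ∀ i j : Nat, ce bd i j
      = ce board i j + (skill.map (fun s => contrib s i j)).sum :=
    fun i j => ce_foldB skill shB0 hvA i j
  -- count both sides
  simp only [PySem.List.pyRange_zero_nat, List.foldl_map, hslice]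
  rw [doubleCountF n m (fun i j => pvGetCell board (i:Int) (j:Int)
        + pvGetCell nb3 (i:Int) (j:Int)) 0,
      gridCount bd m shB.2 0, shB.1]
  refine congrArg (0 + ·) (Finset.sum_congr rfl (fun i hi => Finset.sum_congr rfl
    (fun j hj' => ?_)))
  simp only [Finset.mem_range] at hi hj'
  rw [ceGet, ceGet, hD i j hi hj', hceB i j]
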